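-- pv_equiv track=rewrite | github.com/KabakovAM/PPro-Homework6 | Ex011/check_mate.py | diagonals
-- ===== SOURCE A (Python) =====
-- def diagonals(data, board):
--     a = int(data[0])
--     b = int(data[2])
--     while not(a == 0 or b == 0):
--         a -= 1
--         b -= 1
--         temp = '{}:{}'.format(a, b)
--         if temp in board:
--             return False
--     a = int(data[0])
--     b = int(data[2])
--     while not(a == 9 or b == 9):
--         a += 1
--         b += 1
--         temp = '{}:{}'.format(a, b)
--         if temp in board:
--             return False
--     a = int(data[0])
--     b = int(data[2])
--     while not(a == 9 or b == 0):
--         a += 1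
--         b -= 1
--         temp = '{}:{}'.format(a, b)
--         if temp in board:
--             return False
--     a = int(data[0])
--     b = int(data[2])
--     while not(a == 0 or b == 9):
--         a -= 1
--         b += 1
--         temp = '{}:{}'.format(a, b)
--         if temp in board:
--             return False
--     return True
-- ===== SOURCE B (Python) =====
-- def diagonals(data, board):
--     a = int(data[0])
--     b = int(data[2])
--     for cell in board:
--         if len(cell) == 3 and cell[1] == ':' and cell[0].isdigit() and cell[2].isdigit():
--             x = int(cell[0])
--             y = int(cell[2])
--             if x != a and abs(x - a) == abs(y - b):
--                 return False
--     return True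
-- ===== Notes on version B (the rewrite author's own statement) =====
-- stated objective: alternative
-- what changed: Inverted the direction of the search: instead of walking the four diagonal rays from (a,b) and probing each generated cell string against the board, B makes a single pass over the board entries, parses each 'x:y' cell, and tests the arithmetic diagonal condition |x-a| == |y-b| with x != a; no diagonal cells are ever generated.
import Mathlib
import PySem

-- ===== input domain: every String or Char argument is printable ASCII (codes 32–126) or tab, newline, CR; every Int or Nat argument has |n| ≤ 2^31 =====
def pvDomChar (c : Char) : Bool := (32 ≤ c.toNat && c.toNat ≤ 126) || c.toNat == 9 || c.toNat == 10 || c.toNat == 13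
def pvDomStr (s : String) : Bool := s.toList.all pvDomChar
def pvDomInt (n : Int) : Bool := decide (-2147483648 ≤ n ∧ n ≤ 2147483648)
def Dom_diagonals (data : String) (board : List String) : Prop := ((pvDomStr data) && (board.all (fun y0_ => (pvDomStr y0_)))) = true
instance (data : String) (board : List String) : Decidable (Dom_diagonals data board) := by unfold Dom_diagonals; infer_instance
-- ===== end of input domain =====

-- B inverts the search: instead of walking the four diagonal rays from (a,b) and probing each
-- generated cell against the board, it scans the board once, parses each 'x:y' entry and tests
-- the arithmetic diagonal condition |x-a| = |y-b|, x ≠ a (alternative algorithm).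


-- ===== PORT A =====
-- '{}:{}'.format(a, b)
def pvFmt (a b : Int) : String := PySem.Int.toStr a ++ ":" ++ PySem.Int.toStr b

-- the four while loops of A; result true = the loop hit an occupied cell (early 'return False').
-- Fuel 10 is a totality guard only: with a, b single digits each loop runs at most 9 steps.
def pvLoopDD : Nat → Int → Int → List String → Bool
  | 0, _, _, _ => false
  | n+1, a, b, board =>
    if a = 0 ∨ b = 0 then false
    else
      let a := a - 1
      let b := b - 1
      if board.contains (pvFmt a b) then true else pvLoopDD n a b board

def pvLoopII : Nat → Int → Int → List String → Bool
  | 0, _, _, _ => false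
  | n+1, a, b, board =>
    if a = 9 ∨ b = 9 then false
    else
      let a := a + 1
      let b := b + 1
      if board.contains (pvFmt a b) then true else pvLoopII n a b board

def pvLoopID : Nat → Int → Int → List String → Bool
  | 0, _, _, _ => false
  | n+1, a, b, board =>
    if a = 9 ∨ b = 0 then false
    else
      let a := a + 1
      let b := b - 1
      if board.contains (pvFmt a b) then true else pvLoopID n a b board

def pvLoopDI : Nat → Int → Int → List String → Bool
  | 0, _, _, _ => false
  | n+1, a, b, board =>
    if a = 0 ∨ b = 9 then false
    else
      let a := a - 1
      let b := b + 1
      if board.contains (pvFmt a b) then true else pvLoopDI n a b board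

def diagonals (data : String) (board : List String) : Bool :=
  match PySem.Str.pyGet? data 0, PySem.Str.pyGet? data 2 with
  | some c0, some c2 =>
    match PySem.Int.ofChars? [c0], PySem.Int.ofChars? [c2] with
    | some a, some b =>
      if pvLoopDD 10 a b board then false
      else if pvLoopII 10 a b board then false
      else if pvLoopID 10 a b board then false
      else if pvLoopDI 10 a b board then false
      else true
    | _, _ => false  -- ValueError in Python; excluded by Pre_diagonals
  | _, _ => false    -- IndexError in Python; excluded by Pre_diagonals

-- ===== PORT B =====
-- len(cell) == 3 and cell[1] == ':' and cell[0].isdigit() and cell[2].isdigit()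
-- then x = int(cell[0]), y = int(cell[2]), and the diagonal test x != a and abs(x-a) == abs(y-b).
-- int() on a digit char always succeeds, so the .getD 0 default is unreachable (exact).
def pvIsDiagCell (a b : Int) (cell : String) : Bool :=
  match cell.toList with
  | [x, c, y] =>
    (c == ':') && PySem.Chars.isdigit x && PySem.Chars.isdigit y &&
      (let xv : Int := (PySem.Int.ofChars? [x]).getD 0
       let yv : Int := (PySem.Int.ofChars? [y]).getD 0
       decide (xv ≠ a) && ((xv - a).natAbs == (yv - b).natAbs))
  | _ => false

def diagonals_alt (data : String) (board : List String) : Bool :=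
  ((PySem.Str.pyGet? data 0).bind fun c0 =>
   (PySem.Str.pyGet? data 2).bind fun c2 =>
   (PySem.Int.ofChars? [c0]).bind fun a =>
   (PySem.Int.ofChars? [c2]).map fun b =>
     ! board.any (fun cell => pvIsDiagCell a b cell)).getD false
  -- .getD false: parse/index failure is a Python exception (excluded by Pre_diagonals)

-- ===== PRECONDITION & SPEC =====
-- exactly the inputs where Python A returns: data has an index-2 character and data[0], data[2]
-- are decimal digits (otherwise int(...) / data[2] raises ValueError / IndexError).
def Pre_diagonals (data : String) (board : List String) : Prop :=
  3 ≤ data.toList.length ∧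
  PySem.Chars.isdigit (data.toList.getD 0 ' ') = true ∧
  PySem.Chars.isdigit (data.toList.getD 2 ' ') = true
instance (data : String) (board : List String) : Decidable (Pre_diagonals data board) := by
  unfold Pre_diagonals; infer_instance
def pvWitness_diagonals : String × List String := ("4:4", ["1:1", "7:7"])

def Spec_diagonals (data : String) (board : List String) (out : Bool) : Prop := out = diagonals_alt data board
instance (data : String) (board : List String) (out : Bool) : Decidable (Spec_diagonals data board out) := by unfold Spec_diagonals; infer_instance

-- ===== CLAIM (what is proved, stated in full; the proofs are below) =====
def Claim_equal_diagonals : Prop := ∀ (data : String) (board : List String), Dom_diagonals data board → Pre_diagonals data board → Spec_diagonals data board (diagonals data board)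

-- ===== LEMMAS AND PROOFS =====
-- proof-side view of A's four walks: the visited coordinate pairs
def pvWalkP : Nat → Int → Int → Int → Int → List (Int × Int)
  | 0, _, _, _, _ => []
  | n+1, a, b, da, db =>
    if a = (if da < 0 then (0 : Int) else 9) ∨ b = (if db < 0 then (0 : Int) else 9) then []
    else (a + da, b + db) :: pvWalkP n (a + da) (b + db) da db

def pvCells (a b : Int) : List (Int × Int) :=
  pvWalkP 10 a b (-1) (-1) ++ pvWalkP 10 a b 1 1 ++ pvWalkP 10 a b 1 (-1) ++ pvWalkP 10 a b (-1) 1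

theorem loopDD_eq (n : Nat) (a b : Int) (board : List String) :
    pvLoopDD n a b board = (pvWalkP n a b (-1) (-1)).any (fun p => board.contains (pvFmt p.1 p.2)) := by
  induction n generalizing a b with
  | zero => simp [pvLoopDD, pvWalkP]
  | succ n ih =>
    have hcond : ((a = if (-1 : Int) < 0 then (0 : Int) else 9) ∨
        (b = if (-1 : Int) < 0 then (0 : Int) else 9)) = (a = 0 ∨ b = 0) := by norm_num
    simp only [pvLoopDD, pvWalkP, hcond]
    split_ifs with h hc
    · simp
    · simp_all [← sub_eq_add_neg]
    · simp_all [← sub_eq_add_neg, List.any_cons]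

theorem loopII_eq (n : Nat) (a b : Int) (board : List String) :
    pvLoopII n a b board = (pvWalkP n a b 1 1).any (fun p => board.contains (pvFmt p.1 p.2)) := by
  induction n generalizing a b with
  | zero => simp [pvLoopII, pvWalkP]
  | succ n ih =>
    have hcond : ((a = if (1 : Int) < 0 then (0 : Int) else 9) ∨
        (b = if (1 : Int) < 0 then (0 : Int) else 9)) = (a = 9 ∨ b = 9) := by norm_num
    simp only [pvLoopII, pvWalkP, hcond]
    split_ifs with h hc
    · simp
    · simp_all
    · simp_all [List.any_cons]

theorem loopID_eq (n : Nat) (a b : Int) (board : List String) :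
    pvLoopID n a b board = (pvWalkP n a b 1 (-1)).any (fun p => board.contains (pvFmt p.1 p.2)) := by
  induction n generalizing a b with
  | zero => simp [pvLoopID, pvWalkP]
  | succ n ih =>
    have hcond : ((a = if (1 : Int) < 0 then (0 : Int) else 9) ∨
        (b = if (-1 : Int) < 0 then (0 : Int) else 9)) = (a = 9 ∨ b = 0) := by norm_num
    simp only [pvLoopID, pvWalkP, hcond]
    split_ifs with h hc
    · simp
    · simp_all [← sub_eq_add_neg]
    · simp_all [← sub_eq_add_neg, List.any_cons]

theorem loopDI_eq (n : Nat) (a b : Int) (board : List String) :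
    pvLoopDI n a b board = (pvWalkP n a b (-1) 1).any (fun p => board.contains (pvFmt p.1 p.2)) := by
  induction n generalizing a b with
  | zero => simp [pvLoopDI, pvWalkP]
  | succ n ih =>
    have hcond : ((a = if (-1 : Int) < 0 then (0 : Int) else 9) ∨
        (b = if (1 : Int) < 0 then (0 : Int) else 9)) = (a = 0 ∨ b = 9) := by norm_num
    simp only [pvLoopDI, pvWalkP, hcond]
    split_ifs with h hc
    · simp
    · simp_all [← sub_eq_add_neg]
    · simp_all [← sub_eq_add_neg, List.any_cons]

theorem walkDD_mem (n : Nat) (a b : Int) (ha : 0 ≤ a) (hb : 0 ≤ b)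
    (hn : min a.toNat b.toNat ≤ n) (x y : Int) :
    (x, y) ∈ pvWalkP n a b (-1) (-1) ↔ (x - a = y - b ∧ 0 ≤ x ∧ 0 ≤ y ∧ x < a) := by
  induction n generalizing a b with
  | zero => simp [pvWalkP]; omega
  | succ n ih =>
    have hcond : ((a = if (-1 : Int) < 0 then (0 : Int) else 9) ∨
        (b = if (-1 : Int) < 0 then (0 : Int) else 9)) = (a = 0 ∨ b = 0) := by norm_num
    simp only [pvWalkP, hcond]
    split_ifs with h
    · simp; omega
    · rw [show a + (-1 : Int) = a - 1 by ring, show b + (-1 : Int) = b - 1 by ring,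
        List.mem_cons, ih (a-1) (b-1) (by omega) (by omega) (by omega)]
      simp only [Prod.mk.injEq]
      omega

theorem walkII_mem (n : Nat) (a b : Int) (ha : a ≤ 9) (hb : b ≤ 9)
    (hn : min (9 - a).toNat (9 - b).toNat ≤ n) (x y : Int) :
    (x, y) ∈ pvWalkP n a b 1 1 ↔ (x - a = y - b ∧ x ≤ 9 ∧ y ≤ 9 ∧ a < x) := by
  induction n generalizing a b with
  | zero => simp [pvWalkP]; omega
  | succ n ih =>
    have hcond : ((a = if (1 : Int) < 0 then (0 : Int) else 9) ∨
        (b = if (1 : Int) < 0 then (0 : Int) else 9)) = (a = 9 ∨ b = 9) := by norm_num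
    simp only [pvWalkP, hcond]
    split_ifs with h
    · simp; omega
    · rw [List.mem_cons, ih (a+1) (b+1) (by omega) (by omega) (by omega)]
      simp only [Prod.mk.injEq]
      omega

theorem walkID_mem (n : Nat) (a b : Int) (ha : a ≤ 9) (hb : 0 ≤ b)
    (hn : min (9 - a).toNat b.toNat ≤ n) (x y : Int) :
    (x, y) ∈ pvWalkP n a b 1 (-1) ↔ (x - a = b - y ∧ x ≤ 9 ∧ 0 ≤ y ∧ a < x) := by
  induction n generalizing a b with
  | zero => simp [pvWalkP]; omega
  | succ n ih =>
    have hcond : ((a = if (1 : Int) < 0 then (0 : Int) else 9) ∨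
        (b = if (-1 : Int) < 0 then (0 : Int) else 9)) = (a = 9 ∨ b = 0) := by norm_num
    simp only [pvWalkP, hcond]
    split_ifs with h
    · simp; omega
    · rw [show b + (-1 : Int) = b - 1 by ring, List.mem_cons,
        ih (a+1) (b-1) (by omega) (by omega) (by omega)]
      simp only [Prod.mk.injEq]
      omega

theorem walkDI_mem (n : Nat) (a b : Int) (ha : 0 ≤ a) (hb : b ≤ 9)
    (hn : min a.toNat (9 - b).toNat ≤ n) (x y : Int) :
    (x, y) ∈ pvWalkP n a b (-1) 1 ↔ (a - x = y - b ∧ 0 ≤ x ∧ y ≤ 9 ∧ x < a) := by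
  induction n generalizing a b with
  | zero => simp [pvWalkP]; omega
  | succ n ih =>
    have hcond : ((a = if (-1 : Int) < 0 then (0 : Int) else 9) ∨
        (b = if (1 : Int) < 0 then (0 : Int) else 9)) = (a = 0 ∨ b = 9) := by norm_num
    simp only [pvWalkP, hcond]
    split_ifs with h
    · simp; omega
    · rw [show a + (-1 : Int) = a - 1 by ring, List.mem_cons,
        ih (a-1) (b+1) (by omega) (by omega) (by omega)]
      simp only [Prod.mk.injEq]
      omega

theorem cells_mem (a b : Int) (ha0 : 0 ≤ a) (ha9 : a ≤ 9) (hb0 : 0 ≤ b) (hb9 : b ≤ 9)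
    (x y : Int) :
    (x, y) ∈ pvCells a b ↔
      (0 ≤ x ∧ x ≤ 9 ∧ 0 ≤ y ∧ y ≤ 9 ∧ (x - a).natAbs = (y - b).natAbs ∧ x ≠ a) := by
  simp only [pvCells, List.mem_append,
    walkDD_mem 10 a b ha0 hb0 (by omega) x y,
    walkII_mem 10 a b ha9 hb9 (by omega) x y,
    walkID_mem 10 a b ha9 hb0 (by omega) x y,
    walkDI_mem 10 a b ha0 hb9 (by omega) x y]
  omega

theorem toChars_digit (x : Int) (h0 : 0 ≤ x) (h9 : x ≤ 9) :
    PySem.Int.toChars x = [Char.ofNat (48 + x.toNat)] := by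
  rcases (show x = 0 ∨ x = 1 ∨ x = 2 ∨ x = 3 ∨ x = 4 ∨ x = 5 ∨ x = 6 ∨ x = 7 ∨ x = 8 ∨ x = 9
    by omega) with h|h|h|h|h|h|h|h|h|h <;> subst h <;> decide

theorem digitChar_isdigit (x : Int) (h0 : 0 ≤ x) (h9 : x ≤ 9) :
    PySem.Chars.isdigit (Char.ofNat (48 + x.toNat)) = true := by
  rcases (show x = 0 ∨ x = 1 ∨ x = 2 ∨ x = 3 ∨ x = 4 ∨ x = 5 ∨ x = 6 ∨ x = 7 ∨ x = 8 ∨ x = 9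
    by omega) with h|h|h|h|h|h|h|h|h|h <;> subst h <;> decide

theorem digitChar_toNat (x : Int) (h0 : 0 ≤ x) (h9 : x ≤ 9) :
    (Char.ofNat (48 + x.toNat)).toNat = 48 + x.toNat := by
  rcases (show x = 0 ∨ x = 1 ∨ x = 2 ∨ x = 3 ∨ x = 4 ∨ x = 5 ∨ x = 6 ∨ x = 7 ∨ x = 8 ∨ x = 9
    by omega) with h|h|h|h|h|h|h|h|h|h <;> subst h <;> decide

theorem fmt_digit_toList (x y : Int) (hx0 : 0 ≤ x) (hx9 : x ≤ 9) (hy0 : 0 ≤ y) (hy9 : y ≤ 9) :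
    (pvFmt x y).toList = [Char.ofNat (48 + x.toNat), ':', Char.ofNat (48 + y.toNat)] := by
  simp [pvFmt, String.toList_append, PySem.Int.toList_toStr,
    toChars_digit x hx0 hx9, toChars_digit y hy0 hy9,
    show (":" : String).toList = [':'] by decide]

theorem isdigit_bounds (c : Char) (h : PySem.Chars.isdigit c = true) :
    48 ≤ c.toNat ∧ c.toNat ≤ 57 := by
  have h' := h
  simp only [PySem.Chars.isdigit, Bool.and_eq_true, decide_eq_true_eq] at h'
  obtain ⟨h1, h2⟩ := h'
  constructor
  · simpa [Char.le_def, UInt32.le_iff_toNat_le] using h1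
  · simpa [Char.le_def, UInt32.le_iff_toNat_le] using h2

theorem ofChars_digit (c : Char) (h : PySem.Chars.isdigit c = true) :
    PySem.Int.ofChars? [c] = some ((c.toNat : Int) - 48) := by
  obtain ⟨h1, h2⟩ := isdigit_bounds c h
  have hc := Char.ofNat_toNat c
  rcases (show c.toNat = 48 ∨ c.toNat = 49 ∨ c.toNat = 50 ∨ c.toNat = 51 ∨ c.toNat = 52 ∨
      c.toNat = 53 ∨ c.toNat = 54 ∨ c.toNat = 55 ∨ c.toNat = 56 ∨ c.toNat = 57 by omega) with
    hb|hb|hb|hb|hb|hb|hb|hb|hb|hb <;> (rw [← hc, hb]; decide)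

theorem mem_map_cells_iff (a b : Int) (ha0 : 0 ≤ a) (ha9 : a ≤ 9) (hb0 : 0 ≤ b) (hb9 : b ≤ 9)
    (s : String) :
    s ∈ (pvCells a b).map (fun p => pvFmt p.1 p.2) ↔
      ∃ x y : Int, 0 ≤ x ∧ x ≤ 9 ∧ 0 ≤ y ∧ y ≤ 9 ∧ (x - a).natAbs = (y - b).natAbs ∧ x ≠ a ∧
        s.toList = [Char.ofNat (48 + x.toNat), ':', Char.ofNat (48 + y.toNat)] := by
  rw [List.mem_map]
  constructor
  · rintro ⟨⟨x, y⟩, hp, rfl⟩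
    obtain ⟨h1, h2, h3, h4, h5, h6⟩ := (cells_mem a b ha0 ha9 hb0 hb9 x y).mp hp
    exact ⟨x, y, h1, h2, h3, h4, h5, h6, fmt_digit_toList x y h1 h2 h3 h4⟩
  · rintro ⟨x, y, h1, h2, h3, h4, h5, h6, hs⟩
    refine ⟨(x, y), (cells_mem a b ha0 ha9 hb0 hb9 x y).mpr ⟨h1, h2, h3, h4, h5, h6⟩, ?_⟩
    exact String.toList_inj.mp ((fmt_digit_toList x y h1 h2 h3 h4).trans hs.symm)

theorem contains_cells_eq (a b : Int) (ha0 : 0 ≤ a) (ha9 : a ≤ 9) (hb0 : 0 ≤ b) (hb9 : b ≤ 9)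
    (s : String) :
    ((pvCells a b).map (fun p => pvFmt p.1 p.2)).contains s = pvIsDiagCell a b s := by
  rw [List.contains_eq_mem]
  rcases hsl : s.toList with _ | ⟨x, _ | ⟨c, _ | ⟨y, _ | ⟨z, tl⟩⟩⟩⟩
  · simp [pvIsDiagCell, hsl, mem_map_cells_iff a b ha0 ha9 hb0 hb9]
  · simp [pvIsDiagCell, hsl, mem_map_cells_iff a b ha0 ha9 hb0 hb9]
  · simp [pvIsDiagCell, hsl, mem_map_cells_iff a b ha0 ha9 hb0 hb9]
  case cons.cons.cons.cons =>
    simp [pvIsDiagCell, hsl, mem_map_cells_iff a b ha0 ha9 hb0 hb9]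
  case cons.cons.cons.nil =>
    -- s.toList = [x, c, y]
    simp only [pvIsDiagCell, hsl]
    by_cases hc : c = ':'
    case neg =>
      have hmem : ¬ s ∈ (pvCells a b).map (fun p => pvFmt p.1 p.2) := by
        rw [mem_map_cells_iff a b ha0 ha9 hb0 hb9]
        rintro ⟨x', y', _, _, _, _, _, _, hs⟩
        rw [hsl] at hs
        obtain ⟨-, hc', -⟩ : x = Char.ofNat (48 + x'.toNat) ∧ c = ':' ∧ y = Char.ofNat (48 + y'.toNat) := by
          simpa using hs
        exact hc hc'
      rw [decide_eq_false hmem, beq_eq_false_iff_ne.mpr hc]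
      simp
    case pos =>
      subst hc
      by_cases hx : PySem.Chars.isdigit x = true
      case neg =>
        have hmem : ¬ s ∈ (pvCells a b).map (fun p => pvFmt p.1 p.2) := by
          rw [mem_map_cells_iff a b ha0 ha9 hb0 hb9]
          rintro ⟨x', y', hx0', hx9', _, _, _, _, hs⟩
          rw [hsl] at hs
          obtain ⟨e1, -, -⟩ : x = Char.ofNat (48 + x'.toNat) ∧ (':' : Char) = ':' ∧ y = Char.ofNat (48 + y'.toNat) := by
            simpa using hs
          rw [e1] at hx
          exact hx (digitChar_isdigit x' hx0' hx9')
        rw [decide_eq_false hmem, Bool.not_eq_true] at *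
        simp [hx]
      case pos =>
        by_cases hy : PySem.Chars.isdigit y = true
        case neg =>
          have hmem : ¬ s ∈ (pvCells a b).map (fun p => pvFmt p.1 p.2) := by
            rw [mem_map_cells_iff a b ha0 ha9 hb0 hb9]
            rintro ⟨x', y', _, _, hy0', hy9', _, _, hs⟩
            rw [hsl] at hs
            obtain ⟨-, -, e3⟩ : x = Char.ofNat (48 + x'.toNat) ∧ (':' : Char) = ':' ∧ y = Char.ofNat (48 + y'.toNat) := by
              simpa using hs
            rw [e3] at hy
            exact hy (digitChar_isdigit y' hy0' hy9')
          rw [decide_eq_false hmem, Bool.not_eq_true] at *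
          simp [hy]
        case pos =>
          obtain ⟨hx1, hx2⟩ := isdigit_bounds x hx
          obtain ⟨hy1, hy2⟩ := isdigit_bounds y hy
          have hiff : s ∈ (pvCells a b).map (fun p => pvFmt p.1 p.2) ↔
              (((x.toNat : Int) - 48) ≠ a ∧
                (((x.toNat : Int) - 48) - a).natAbs = (((y.toNat : Int) - 48) - b).natAbs) := by
            rw [mem_map_cells_iff a b ha0 ha9 hb0 hb9]
            constructor
            · rintro ⟨x', y', hx0', hx9', hy0', hy9', hab, hne, hs⟩
              rw [hsl] at hs
              obtain ⟨e1, -, e3⟩ : x = Char.ofNat (48 + x'.toNat) ∧ (':' : Char) = ':' ∧ y = Char.ofNat (48 + y'.toNat) := by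
                simpa using hs
              have t1 : x.toNat = 48 + x'.toNat := by rw [e1]; exact digitChar_toNat x' hx0' hx9'
              have t3 : y.toNat = 48 + y'.toNat := by rw [e3]; exact digitChar_toNat y' hy0' hy9'
              constructor
              · omega
              · omega
            · rintro ⟨hne, hab⟩
              refine ⟨(x.toNat : Int) - 48, (y.toNat : Int) - 48,
                by omega, by omega, by omega, by omega, hab, hne, ?_⟩
              rw [hsl]
              have e1 : Char.ofNat (48 + ((x.toNat : Int) - 48).toNat) = x := by
                rw [show 48 + ((x.toNat : Int) - 48).toNat = x.toNat by omega]
                exact Char.ofNat_toNat x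
              have e3 : Char.ofNat (48 + ((y.toNat : Int) - 48).toNat) = y := by
                rw [show 48 + ((y.toNat : Int) - 48).toNat = y.toNat by omega]
                exact Char.ofNat_toNat y
              rw [e1, e3]
          rw [ofChars_digit x hx, ofChars_digit y hy]
          by_cases h1 : ((x.toNat : Int) - 48) = a <;>
            by_cases h2 : (((x.toNat : Int) - 48) - a).natAbs = (((y.toNat : Int) - 48) - b).natAbs <;>
            simp [hiff, h1, h2, hx, hy]

theorem any_contains_comm (l m : List String) :
    l.any (fun c => m.contains c) = m.any (fun s => l.contains s) := by
  rw [Bool.eq_iff_iff]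
  simp only [List.any_eq_true, List.contains_eq_mem, decide_eq_true_eq]
  tauto

theorem A_eq (a b : Int) (board : List String)
    (ha0 : 0 ≤ a) (ha9 : a ≤ 9) (hb0 : 0 ≤ b) (hb9 : b ≤ 9) :
    (if pvLoopDD 10 a b board then false
     else if pvLoopII 10 a b board then false
     else if pvLoopID 10 a b board then false
     else if pvLoopDI 10 a b board then false
     else true)
    = ! board.any (fun cell => pvIsDiagCell a b cell) := by
  have key : (pvCells a b).any (fun p => board.contains (pvFmt p.1 p.2))
      = board.any (fun cell => pvIsDiagCell a b cell) := by
    calc (pvCells a b).any (fun p => board.contains (pvFmt p.1 p.2))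
        = ((pvCells a b).map (fun p => pvFmt p.1 p.2)).any (fun c => board.contains c) := by
          simp [List.any_map, Function.comp_def]
      _ = board.any (fun s => ((pvCells a b).map (fun p => pvFmt p.1 p.2)).contains s) :=
          any_contains_comm _ _
      _ = board.any (fun cell => pvIsDiagCell a b cell) :=
          PySem.List.any_congr_mem (fun s _ => contains_cells_eq a b ha0 ha9 hb0 hb9 s)
  have hsplit : (pvCells a b).any (fun p => board.contains (pvFmt p.1 p.2))
      = ((pvWalkP 10 a b (-1) (-1)).any (fun p => board.contains (pvFmt p.1 p.2))
        || ((pvWalkP 10 a b 1 1).any (fun p => board.contains (pvFmt p.1 p.2))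
        || ((pvWalkP 10 a b 1 (-1)).any (fun p => board.contains (pvFmt p.1 p.2))
        || (pvWalkP 10 a b (-1) 1).any (fun p => board.contains (pvFmt p.1 p.2))))) := by
    simp [pvCells, List.any_append]
  rw [← key, hsplit, loopDD_eq, loopII_eq, loopID_eq, loopDI_eq]
  generalize (pvWalkP 10 a b (-1) (-1)).any (fun p => board.contains (pvFmt p.1 p.2)) = f1
  generalize (pvWalkP 10 a b 1 1).any (fun p => board.contains (pvFmt p.1 p.2)) = f2
  generalize (pvWalkP 10 a b 1 (-1)).any (fun p => board.contains (pvFmt p.1 p.2)) = f3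
  generalize (pvWalkP 10 a b (-1) 1).any (fun p => board.contains (pvFmt p.1 p.2)) = f4
  cases f1 <;> cases f2 <;> cases f3 <;> cases f4 <;> rfl

-- ===== VERDICT (by name: the statement is the Claim_ definition above) =====
theorem diagonals_spec : Claim_equal_diagonals := by
  intro data board _ hpre
  obtain ⟨hlen, hd0, hd2⟩ := hpre
  have h0 : PySem.Str.pyGet? data 0 = some (data.toList.getD 0 ' ') := by
    have hlt : 0 < data.toList.length := by omega
    rw [List.getD_eq_getElem _ _ hlt]
    simpa using PySem.List.pyGet?_ofNat data.toList 0 hlt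
  have h2 : PySem.Str.pyGet? data 2 = some (data.toList.getD 2 ' ') := by
    have hlt : 2 < data.toList.length := by omega
    rw [List.getD_eq_getElem _ _ hlt]
    simpa using PySem.List.pyGet?_ofNat data.toList 2 hlt
  have hA := ofChars_digit _ hd0
  have hB := ofChars_digit _ hd2
  obtain ⟨ha1, ha2⟩ := isdigit_bounds _ hd0
  obtain ⟨hb1, hb2⟩ := isdigit_bounds _ hd2
  unfold Spec_diagonals
  simp only [diagonals, diagonals_alt, h0, h2, hA, hB, Option.bind, Option.map, Option.getD]
  exact A_eq _ _ board (by omega) (by omega) (by omega) (by omega)
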